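-- pv_equiv track=rewrite | github.com/RomyBos/advent-of-code-2021 | day-10/day10.py | getAutoCompleteScore
-- ===== SOURCE A (Python) =====
-- CHARSSCOREDICTPART2 = {')': 1, ']': 2, '}': 3, '>': 4}
--
-- def getAutoCompleteScore(closingCharsList):
--     autoCompleteScore = 0
--     autoCompleteScoreList = []
--     for charList in closingCharsList:
--         lineScore = 0
--         for char in charList:
--             lineScore = lineScore * 5
--             lineScore += (CHARSSCOREDICTPART2[char])
--         autoCompleteScoreList.append(lineScore)
--     autoCompleteScoreList.sort()
--     return autoCompleteScoreList[len(autoCompleteScoreList)//2]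
-- ===== SOURCE B (Python) =====
-- CHARSSCOREDICTPART2 = {')': 1, ']': 2, '}': 3, '>': 4}
--
-- def getAutoCompleteScore(closingCharsList):
--     scores = []
--     for charList in closingCharsList:
--         lineScore = 0
--         for char in charList:
--             lineScore = lineScore * 5
--             lineScore += (CHARSSCOREDICTPART2[char])
--         scores.append(lineScore)
--     # quickselect for the order statistic at rank len//2 (no sorting)
--     k = len(scores) // 2
--     xs = scores
--     while True:
--         p = xs[0]
--         lt = [x for x in xs if x < p]
--         eq = [x for x in xs if x == p]
--         if k < len(lt):
--             xs = lt
--         elif k < len(lt) + len(eq):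
--             return p
--         else:
--             k -= len(lt) + len(eq)
--             xs = [x for x in xs if x > p]
-- ===== Notes on version B (the rewrite author's own statement) =====
-- stated objective: alternative
-- what changed: The per-line score building is kept, but the median is computed by a three-way-partition quickselect for the order statistic at rank len//2 instead of sorting the whole list and indexing it.
import Mathlib
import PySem

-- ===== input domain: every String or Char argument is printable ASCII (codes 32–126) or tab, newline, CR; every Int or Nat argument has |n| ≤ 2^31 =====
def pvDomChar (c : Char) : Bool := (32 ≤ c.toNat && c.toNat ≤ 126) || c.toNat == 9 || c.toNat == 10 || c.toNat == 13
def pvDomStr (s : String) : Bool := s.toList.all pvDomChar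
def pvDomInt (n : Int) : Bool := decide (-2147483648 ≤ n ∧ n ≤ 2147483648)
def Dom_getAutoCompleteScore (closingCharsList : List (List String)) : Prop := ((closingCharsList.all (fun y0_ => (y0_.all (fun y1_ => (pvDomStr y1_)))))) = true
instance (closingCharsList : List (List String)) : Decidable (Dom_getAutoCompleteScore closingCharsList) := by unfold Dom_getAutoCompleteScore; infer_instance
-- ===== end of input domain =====

-- B replaces A's sort-then-index median by a three-way-partition quickselect of the rank len//2 order statistic (objective: alternative algorithm, same result element-for-element).

-- ===== PORT A =====
-- module constant CHARSSCOREDICTPART2 (shared by both Pythons)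
def CHARSSCOREDICTPART2 : PySem.Dict String Int :=
  PySem.Dict.ofList [(")", 1), ("]", 2), ("}", 3), (">", 4)]

-- dict lookup raises KeyError on a missing key and the final index raises IndexError on an
-- empty list; the getD/pyGetD defaults are exact on Pre_ (all keys present, nonempty list).
def getAutoCompleteScore (closingCharsList : List (List String)) : Int :=
  let autoCompleteScoreList :=
    closingCharsList.foldl (fun acc charList =>
      acc ++ [charList.foldl (fun lineScore ch =>
        lineScore * 5 + CHARSSCOREDICTPART2.getD ch 0) 0]) []
  let sortedL := PySem.List.sorted autoCompleteScoreList (fun x => x) false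
  PySem.List.pyGetD sortedL (PySem.Int.floordiv (PySem.List.len sortedL) 2) 0

-- ===== PORT B =====
-- the while-loop quickselect of Source B as structural recursion (the partitions strictly shrink);
-- [] branch is Python's IndexError on xs[0], excluded by Pre_
def quickselect (xs : List Int) (k : Nat) : Int :=
  match xs with
  | [] => 0
  | p :: rest =>
    let lt := (p :: rest).filter (fun x => decide (x < p))
    let eq := (p :: rest).filter (fun x => decide (x = p))
    if k < lt.length then quickselect lt k
    else if k < lt.length + eq.length then p
    else quickselect ((p :: rest).filter (fun x => decide (p < x))) (k - (lt.length + eq.length))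
termination_by xs.length
decreasing_by
  · exact List.length_filter_lt_length_iff_exists.mpr ⟨p, by simp⟩
  · exact List.length_filter_lt_length_iff_exists.mpr ⟨p, by simp⟩

def getAutoCompleteScore_alt (closingCharsList : List (List String)) : Int :=
  let scores :=
    closingCharsList.foldl (fun acc charList =>
      acc ++ [charList.foldl (fun lineScore ch =>
        lineScore * 5 + CHARSSCOREDICTPART2.getD ch 0) 0]) []
  quickselect scores (scores.length / 2)

-- ===== PRECONDITION & SPEC =====
-- Pre_ excludes exactly the inputs where A raises: KeyError for a string that is not a key of
-- the score dict, IndexError (index into the empty score list) for an empty outer list.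
def Pre_getAutoCompleteScore (closingCharsList : List (List String)) : Prop :=
  closingCharsList ≠ [] ∧
  ∀ cl ∈ closingCharsList, ∀ s ∈ cl, s = ")" ∨ s = "]" ∨ s = "}" ∨ s = ">"
instance (closingCharsList : List (List String)) : Decidable (Pre_getAutoCompleteScore closingCharsList) := by
  unfold Pre_getAutoCompleteScore; infer_instance

def pvWitness_getAutoCompleteScore : List (List String) := [[")", "]"], [">"], []]

def Spec_getAutoCompleteScore (closingCharsList : List (List String)) (out : Int) : Prop := out = getAutoCompleteScore_alt closingCharsList
instance (closingCharsList : List (List String)) (out : Int) : Decidable (Spec_getAutoCompleteScore closingCharsList out) := by unfold Spec_getAutoCompleteScore; infer_instance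

-- ===== CLAIM (what is proved, stated in full; the proofs are below) =====
def Claim_equal_getAutoCompleteScore : Prop := ∀ (closingCharsList : List (List String)), Dom_getAutoCompleteScore closingCharsList → Pre_getAutoCompleteScore closingCharsList → Spec_getAutoCompleteScore closingCharsList (getAutoCompleteScore closingCharsList)

-- ===== LEMMAS AND PROOFS =====

-- sorted(xs) decomposes around any pivot p into sorted(<p) ++ (all =p) ++ sorted(>p)
theorem sorted_partition (xs : List Int) (p : Int) :
    PySem.List.sorted xs (fun x => x) false
      = PySem.List.sorted (xs.filter (fun x => decide (x < p))) (fun x => x) false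
        ++ xs.filter (fun x => decide (x = p))
        ++ PySem.List.sorted (xs.filter (fun x => decide (p < x))) (fun x => x) false := by
  set lt := xs.filter (fun x => decide (x < p)) with hlt
  set eqL := xs.filter (fun x => decide (x = p)) with heq
  set gt := xs.filter (fun x => decide (p < x)) with hgt
  have hfe : (xs.filter (fun x => !decide (x < p))).filter (fun x => decide (x = p)) = eqL := by
    rw [List.filter_filter, heq]
    apply List.filter_congr
    intro x _
    by_cases h : x = p <;> simp [h]
  have hfg : (xs.filter (fun x => !decide (x < p))).filter (fun x => !decide (x = p)) = gt := by
    rw [List.filter_filter, hgt]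
    apply List.filter_congr
    intro x _
    by_cases h1 : x = p <;> by_cases h2 : x < p <;> simp [h1, h2] <;> omega
  have h3 : (eqL ++ gt).Perm (xs.filter (fun x => !decide (x < p))) := by
    have := List.filter_append_perm (fun x => decide (x = p)) (xs.filter (fun x => !decide (x < p)))
    rwa [hfe, hfg] at this
  have step1 : (PySem.List.sorted lt (fun x => x) false ++ eqL ++ PySem.List.sorted gt (fun x => x) false).Perm (lt ++ (eqL ++ gt)) := by
    rw [List.append_assoc]
    exact (PySem.List.sorted_perm ..).append ((List.Perm.refl eqL).append (PySem.List.sorted_perm ..))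
  have hperm : (PySem.List.sorted lt (fun x => x) false ++ eqL ++ PySem.List.sorted gt (fun x => x) false).Perm xs :=
    step1.trans (((List.Perm.refl lt).append h3).trans (List.filter_append_perm _ xs))
  have memlt : ∀ x ∈ PySem.List.sorted lt (fun x => x) false, x < p := by
    intro x hx
    have := ((PySem.List.mem_sorted _ _ _ _).mp hx)
    rw [hlt] at this
    exact of_decide_eq_true (List.mem_filter.mp this).2
  have memeq : ∀ x ∈ eqL, x = p := by
    intro x hx
    rw [heq] at hx
    exact of_decide_eq_true (List.mem_filter.mp hx).2
  have memgt : ∀ x ∈ PySem.List.sorted gt (fun x => x) false, p < x := by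
    intro x hx
    have := ((PySem.List.mem_sorted _ _ _ _).mp hx)
    rw [hgt] at this
    exact of_decide_eq_true (List.mem_filter.mp this).2
  have hpw : (PySem.List.sorted lt (fun x => x) false ++ eqL ++ PySem.List.sorted gt (fun x => x) false).Pairwise (· ≤ ·) := by
    rw [List.append_assoc, List.pairwise_append]
    refine ⟨PySem.List.sorted_pairwise .., ?_, ?_⟩
    · rw [List.pairwise_append]
      refine ⟨List.pairwise_of_forall_mem_list (fun a ha b hb => ?_), PySem.List.sorted_pairwise .., ?_⟩
      · rw [memeq a ha, memeq b hb]
      · intro a ha b hb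
        rw [memeq a ha]
        exact le_of_lt (memgt b hb)
    · intro a ha b hb
      rcases List.mem_append.mp hb with hb | hb
      · rw [memeq b hb]; exact le_of_lt (memlt a ha)
      · exact le_of_lt (lt_trans (memlt a ha) (memgt b hb))
  exact PySem.List.sorted_id_eq_of_perm_of_pairwise _ _ hperm hpw

-- quickselect computes exactly the k-th element of the sorted list
theorem quickselect_sorted : ∀ (n : Nat) (xs : List Int) (k : Nat), xs.length ≤ n → k < xs.length →
    quickselect xs k = (PySem.List.sorted xs (fun x => x) false).getD k 0 := by
  intro n
  induction n with
  | zero => intro xs k h1 h2; omega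
  | succ n ih =>
    intro xs k h1 h2
    match xs with
    | [] => simp at h2
    | p :: rest =>
      have hp : p ∈ p :: rest := List.mem_cons_self ..
      have hpart := sorted_partition (p :: rest) p
      set lt := (p :: rest).filter (fun x => decide (x < p)) with hlt
      set eqL := (p :: rest).filter (fun x => decide (x = p)) with heq
      set gt := (p :: rest).filter (fun x => decide (p < x)) with hgt
      have hlsl : (PySem.List.sorted lt (fun x => x) false).length = lt.length := PySem.List.length_sorted ..
      have hlsg : (PySem.List.sorted gt (fun x => x) false).length = gt.length := PySem.List.length_sorted ..
      have hlen : lt.length + eqL.length + gt.length = (p :: rest).length := by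
        have hc := congrArg List.length hpart
        simp only [List.length_append, PySem.List.length_sorted] at hc
        omega
      have heqne : 0 < eqL.length := by
        have : p ∈ eqL := List.mem_filter.mpr ⟨hp, by simp⟩
        exact List.length_pos_of_mem this
      rw [quickselect]
      simp only [← hlt, ← heq, ← hgt]
      split_ifs with c1 c2
      · -- k < lt.length: recurse into the lower partition
        rw [hpart, List.getD_append _ _ _ _ (by simp [hlsl]; omega),
            List.getD_append _ _ _ _ (by omega)]
        exact ih lt k (by have := List.length_filter_le (fun x => decide (x < p)) (p :: rest); omega) c1
      · -- lt.length ≤ k < lt.length + eqL.length: the answer is the pivot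
        rw [hpart, List.getD_append _ _ _ _ (by simp [hlsl]; omega),
            List.getD_append_right _ _ _ _ (by omega)]
        have hi : k - (PySem.List.sorted lt (fun x => x) false).length < eqL.length := by omega
        rw [List.getD_eq_getElem _ _ hi]
        have hmem : eqL[k - (PySem.List.sorted lt (fun x => x) false).length]'hi
            ∈ List.filter (fun x => decide (x = p)) (p :: rest) := List.getElem_mem hi
        have hval : eqL[k - (PySem.List.sorted lt (fun x => x) false).length]'hi = p := by
          simpa using (List.mem_filter.mp hmem).2
        exact hval.symm
      · -- recurse into the upper partition
        rw [hpart, List.getD_append_right _ _ _ _ (by simp [hlsl]; omega)]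
        have harith : k - ((PySem.List.sorted lt (fun x => x) false) ++ eqL).length
            = k - (lt.length + eqL.length) := by simp [hlsl]
        rw [harith]
        have hgn : gt.length ≤ n := by omega
        have h2' : k < lt.length + eqL.length + gt.length := by rw [hlen]; exact h2
        have hkg : k - (lt.length + eqL.length) < gt.length := by omega
        exact ih gt (k - (lt.length + eqL.length)) hgn hkg

-- ===== VERDICT (by name: the statement is the Claim_ definition above) =====
theorem getAutoCompleteScore_spec : Claim_equal_getAutoCompleteScore := by
  intro l hdom hpre
  show getAutoCompleteScore l = getAutoCompleteScore_alt l
  simp only [getAutoCompleteScore, getAutoCompleteScore_alt]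
  set scores := l.foldl (fun acc charList =>
      acc ++ [charList.foldl (fun lineScore ch =>
        lineScore * 5 + CHARSSCOREDICTPART2.getD ch 0) 0]) [] with hsc
  have hmap : scores = l.map (fun charList => charList.foldl (fun lineScore ch =>
      lineScore * 5 + CHARSSCOREDICTPART2.getD ch 0) 0) :=
    PySem.List.foldl_append_singleton_eq_map ..
  have hpos : 0 < scores.length := by
    rw [hmap]
    simpa using List.length_pos_of_ne_nil hpre.1
  have hslen : (PySem.List.sorted scores (fun x => x) false).length = scores.length :=
    PySem.List.length_sorted ..
  have hfd : PySem.Int.floordiv (PySem.List.len (PySem.List.sorted scores (fun x => x) false)) 2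
      = ((scores.length / 2 : Nat) : Int) := by
    have h : ((scores.length : Int)).fdiv 2 = ((scores.length : Int)) / 2 :=
      Int.fdiv_eq_ediv_of_nonneg _ (by norm_num)
    simp [PySem.Int.floordiv, PySem.List.len_eq, hslen, h]
  rw [hfd, PySem.List.pyGetD_natCast]
  exact (quickselect_sorted scores.length scores (scores.length / 2) le_rfl
    (Nat.div_lt_self hpos (by norm_num))).symm
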